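-- pv_equiv track=rewrite | github.com/yao-baijian/fem | FEM/placement/placement.py | _calculate_hpwl_from_coordinates
-- ===== SOURCE A (Python) =====
-- def _calculate_hpwl_from_coordinates(coordinates):
--     x_coords = [coord[0] for coord in coordinates]
--     y_coords = [coord[1] for coord in coordinates]
--
--     min_x, max_x = min(x_coords), max(x_coords)
--     min_y, max_y = min(y_coords), max(y_coords)
--
--     hpwl = (max_x - min_x) + (max_y - min_y)
--     bbox = {
--         'min_x': min_x, 'max_x': max_x,
--         'min_y': min_y, 'max_y': max_y,
--         'width': max_x - min_x,
--         'height': max_y - min_y,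
--         'num_pins': len(coordinates)
--     }
--
--     return hpwl, bbox
-- ===== SOURCE B (Python) =====
-- def _calculate_hpwl_from_coordinates(coordinates):
--     # Sort each coordinate axis once; the extrema are the ends of the sorted lists.
--     xs = sorted(c[0] for c in coordinates)
--     ys = sorted(c[1] for c in coordinates)
--     min_x, max_x = xs[0], xs[-1]
--     min_y, max_y = ys[0], ys[-1]
--     hpwl = (max_x - min_x) + (max_y - min_y)
--     bbox = {
--         'min_x': min_x, 'max_x': max_x,
--         'min_y': min_y, 'max_y': max_y,
--         'width': max_x - min_x,
--         'height': max_y - min_y,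
--         'num_pins': len(coordinates)
--     }
--     return hpwl, bbox
-- ===== Notes on version B (the rewrite author's own statement) =====
-- stated objective: alternative
-- what changed: Replaces the four min/max scans with sorting each coordinate axis once and reading the extrema from the two ends of the sorted lists.
import Mathlib
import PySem

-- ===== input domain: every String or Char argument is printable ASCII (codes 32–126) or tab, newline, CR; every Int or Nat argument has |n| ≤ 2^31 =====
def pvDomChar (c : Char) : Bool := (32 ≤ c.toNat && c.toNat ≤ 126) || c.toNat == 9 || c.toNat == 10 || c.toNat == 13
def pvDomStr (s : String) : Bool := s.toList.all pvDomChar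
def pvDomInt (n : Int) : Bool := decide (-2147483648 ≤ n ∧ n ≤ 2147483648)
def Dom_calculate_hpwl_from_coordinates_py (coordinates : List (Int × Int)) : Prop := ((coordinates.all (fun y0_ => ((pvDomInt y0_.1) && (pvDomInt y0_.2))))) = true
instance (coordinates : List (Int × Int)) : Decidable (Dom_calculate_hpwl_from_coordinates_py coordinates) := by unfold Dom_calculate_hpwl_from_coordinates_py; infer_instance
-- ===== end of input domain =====

-- B sorts each coordinate axis once and reads the extrema from the ends of the sorted lists, instead of A's four min/max scans; equivalence is about the return value; Pre_ excludes the empty list (A raises ValueError there).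


-- ===== PORT A =====
-- A: build the x-list and the y-list, then min/max each; min([]) raises ValueError, so the none case is outside Pre_.
def calculate_hpwl_from_coordinates_py (coordinates : List (Int × Int)) : Int × (List (String × Int)) :=
  let x_coords := coordinates.map (fun coord => coord.1)
  let y_coords := coordinates.map (fun coord => coord.2)
  match PySem.List.min? x_coords (fun x => x), PySem.List.max? x_coords (fun x => x),
        PySem.List.min? y_coords (fun y => y), PySem.List.max? y_coords (fun y => y) with
  | some min_x, some max_x, some min_y, some max_y =>
    let hpwl := (max_x - min_x) + (max_y - min_y)
    let bbox : List (String × Int) :=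
      [("min_x", min_x), ("max_x", max_x), ("min_y", min_y), ("max_y", max_y),
       ("width", max_x - min_x), ("height", max_y - min_y),
       ("num_pins", (coordinates.length : Int))]
    (hpwl, bbox)
  | _, _, _, _ => (0, [])   -- unreachable under Pre_ (Python raises ValueError on empty input)

-- ===== PORT B =====
-- B: sort each axis, extrema are xs[0], xs[-1], ys[0], ys[-1]; indexing an empty sorted list raises IndexError (outside Pre_).
def calculate_hpwl_from_coordinates_py_alt (coordinates : List (Int × Int)) : Int × (List (String × Int)) :=
  let xs := PySem.List.sorted (coordinates.map (fun c => c.1)) (fun x => x) false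
  let ys := PySem.List.sorted (coordinates.map (fun c => c.2)) (fun x => x) false
  -- each xs[i] is an IndexError (none) only on the empty list, which is outside Pre_
  match PySem.List.pyGet? xs 0 with
  | none => (0, [])
  | some min_x =>
    match PySem.List.pyGet? xs (-1) with
    | none => (0, [])
    | some max_x =>
      match PySem.List.pyGet? ys 0 with
      | none => (0, [])
      | some min_y =>
        match PySem.List.pyGet? ys (-1) with
        | none => (0, [])
        | some max_y =>
          let hpwl := (max_x - min_x) + (max_y - min_y)
          (hpwl,
           [("min_x", min_x), ("max_x", max_x), ("min_y", min_y), ("max_y", max_y),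
            ("width", max_x - min_x), ("height", max_y - min_y),
            ("num_pins", (coordinates.length : Int))])

-- ===== PRECONDITION & SPEC =====
-- Pre_ excludes only the empty list, on which A raises ValueError (min of an empty sequence).
def Pre_calculate_hpwl_from_coordinates_py (coordinates : List (Int × Int)) : Prop := coordinates ≠ []
instance (coordinates : List (Int × Int)) : Decidable (Pre_calculate_hpwl_from_coordinates_py coordinates) := by unfold Pre_calculate_hpwl_from_coordinates_py; infer_instance
def pvWitness_calculate_hpwl_from_coordinates_py : (List (Int × Int)) := [(1, 2), (4, -3)]
def Spec_calculate_hpwl_from_coordinates_py (coordinates : List (Int × Int)) (out : Int × (List (String × Int))) : Prop := out = calculate_hpwl_from_coordinates_py_alt coordinates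
instance (coordinates : List (Int × Int)) (out : Int × (List (String × Int))) : Decidable (Spec_calculate_hpwl_from_coordinates_py coordinates out) := by unfold Spec_calculate_hpwl_from_coordinates_py; infer_instance

-- ===== CLAIM (what is proved, stated in full; the proofs are below) =====
def Claim_equal_calculate_hpwl_from_coordinates_py : Prop := ∀ (coordinates : List (Int × Int)), Dom_calculate_hpwl_from_coordinates_py coordinates → Pre_calculate_hpwl_from_coordinates_py coordinates → Spec_calculate_hpwl_from_coordinates_py coordinates (calculate_hpwl_from_coordinates_py coordinates)

-- ===== LEMMAS AND PROOFS =====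

-- On a nonempty Int list, xs_sorted[0] is exactly Python's min(xs) and xs_sorted[-1] exactly max(xs).
theorem sorted_ends_eq_extrema (l : List Int) (hl : l ≠ []) :
    PySem.List.pyGet? (PySem.List.sorted l (fun x => x) false) 0 = PySem.List.min? l (fun x => x) ∧
    PySem.List.pyGet? (PySem.List.sorted l (fun x => x) false) (-1) = PySem.List.max? l (fun x => x) := by
  set s := PySem.List.sorted l (fun x => x) false with hs
  have hsne : s ≠ [] := by
    intro h; exact hl ((PySem.List.sorted_eq_nil_iff l (fun x => x) false).mp h)
  obtain ⟨m, ts, hcons⟩ := List.exists_cons_of_ne_nil hsne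
  have hc' : PySem.List.sorted l (fun x => x) false = m :: ts := hcons
  obtain ⟨a, ha⟩ : ∃ a, PySem.List.min? l (fun x => x) = some a := by
    cases hmin : PySem.List.min? l (fun x => x) with
    | none => exact absurd ((PySem.List.min?_eq_none_iff l (fun x => x)).mp hmin) hl
    | some a => exact ⟨a, rfl⟩
  obtain ⟨b, hb⟩ : ∃ b, PySem.List.max? l (fun x => x) = some b := by
    cases hmax : PySem.List.max? l (fun x => x) with
    | none => exact absurd ((PySem.List.max?_eq_none_iff l (fun x => x)).mp hmax) hl
    | some b => exact ⟨b, rfl⟩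
  constructor
  · -- head of sorted = min
    have hma : m = a := by
      have hmem : m ∈ l := (PySem.List.mem_sorted l (fun x => x) false m).mp (by rw [hc']; simp)
      have h1 : a ≤ m := PySem.List.min?_isMin ha m hmem
      have h2 : m ≤ a := PySem.List.key_head_sorted_le l (fun x => x) hc' a (PySem.List.min?_mem ha)
      exact le_antisymm h2 h1
    rw [hcons, PySem.List.pyGet?_zero_cons, hma, ha]
  · -- last of sorted = max
    have hlen : 0 < s.length := List.length_pos_iff.mpr hsne
    have hlast : PySem.List.pyGet? s (-1) = some (s.getLast hsne) := by
      have h1 : PySem.List.pyGet? s (-1) = s[s.length - 1]? := by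
        have hone : (1 : Nat) ≤ s.length := hlen
        simp [PySem.List.pyGet?, PySem.List.pyIdx?, hone]
      rw [h1, List.getElem?_eq_getElem (by omega), List.getLast_eq_getElem]
    have hLb : s.getLast hsne = b := by
      have hmemL : s.getLast hsne ∈ l :=
        (PySem.List.mem_sorted l (fun x => x) false _).mp (List.getLast_mem hsne)
      have h1 : s.getLast hsne ≤ b := PySem.List.max?_isMax hb _ hmemL
      have h2 : b ≤ s.getLast hsne := by
        have hbmem : b ∈ s := (PySem.List.mem_sorted l (fun x => x) false b).mpr (PySem.List.max?_mem hb)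
        obtain ⟨i, hi, hib⟩ := List.getElem_of_mem hbmem
        have hmono := PySem.List.sorted_id_getElem_mono (xs := l) (p := i) (q := s.length - 1)
          (by omega) (by rw [← hs]; omega)
        rw [List.getLast_eq_getElem]
        simpa [← hs, hib] using hmono
      exact le_antisymm h1 h2
    rw [hlast, hLb, hb]

theorem calculate_hpwl_from_coordinates_py_spec : Claim_equal_calculate_hpwl_from_coordinates_py := by
  intro coordinates _ hpre
  unfold Spec_calculate_hpwl_from_coordinates_py
  have hx : coordinates.map (fun c => c.1) ≠ [] := by
    simpa using hpre
  have hy : coordinates.map (fun c => c.2) ≠ [] := by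
    simpa using hpre
  obtain ⟨hx0, hx1⟩ := sorted_ends_eq_extrema _ hx
  obtain ⟨hy0, hy1⟩ := sorted_ends_eq_extrema _ hy
  obtain ⟨a, ha⟩ : ∃ a, PySem.List.min? (coordinates.map (fun c => c.1)) (fun x => x) = some a := by
    cases h : PySem.List.min? (coordinates.map (fun c => c.1)) (fun x => x) with
    | none => exact absurd ((PySem.List.min?_eq_none_iff _ _).mp h) hx
    | some a => exact ⟨a, rfl⟩
  obtain ⟨b, hb⟩ : ∃ b, PySem.List.max? (coordinates.map (fun c => c.1)) (fun x => x) = some b := by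
    cases h : PySem.List.max? (coordinates.map (fun c => c.1)) (fun x => x) with
    | none => exact absurd ((PySem.List.max?_eq_none_iff _ _).mp h) hx
    | some b => exact ⟨b, rfl⟩
  obtain ⟨c, hc⟩ : ∃ c, PySem.List.min? (coordinates.map (fun c => c.2)) (fun x => x) = some c := by
    cases h : PySem.List.min? (coordinates.map (fun c => c.2)) (fun x => x) with
    | none => exact absurd ((PySem.List.min?_eq_none_iff _ _).mp h) hy
    | some c => exact ⟨c, rfl⟩
  obtain ⟨d, hd⟩ : ∃ d, PySem.List.max? (coordinates.map (fun c => c.2)) (fun x => x) = some d := by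
    cases h : PySem.List.max? (coordinates.map (fun c => c.2)) (fun x => x) with
    | none => exact absurd ((PySem.List.max?_eq_none_iff _ _).mp h) hy
    | some d => exact ⟨d, rfl⟩
  unfold calculate_hpwl_from_coordinates_py calculate_hpwl_from_coordinates_py_alt
  simp only [hx0, hx1, hy0, hy1, ha, hb, hc, hd]
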